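-- pv_equiv track=rewrite | github.com/GDSC-Hanyang/Algorithm-1- | 설유민/Lv.1/42862-체육복/solution.py | solution
-- ===== SOURCE A (Python) =====
-- def solution(n, lost, reserve):
--     lost_without_rez = sorted(list(set(lost) - set(reserve)))
--     reserve_without_loss = sorted(list(set(reserve) - set(lost)))
--
--     pairs = {}
--
--     for lost_stu in lost_without_rez:
--         for reserve_stu in reserve_without_loss:
--             if ((lost_stu - reserve_stu) == -1 or (lost_stu - reserve_stu) == 1):
--                 pairs[reserve_stu] = lost_stu
--     answer = n - len(lost_without_rez) + len(set(pairs))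
--     if answer > n:
--         answer = n
--     return answer
-- ===== SOURCE B (Python) =====
-- def solution(n, lost, reserve):
--     lost_only = sorted(set(lost) - set(reserve))
--     res_only = sorted(set(reserve) - set(lost))
--     m = 0
--     i = 0
--     L = len(lost_only)
--     for r in res_only:
--         while i < L and lost_only[i] < r - 1:
--             i += 1
--         if i < L and (lost_only[i] == r - 1 or lost_only[i] == r + 1):
--             m += 1
--     return min(n, n - len(lost_only) + m)
-- ===== Notes on version B (the rewrite author's own statement) =====
-- stated objective: faster
-- what changed: Replaces A's nested loop over all (lost-only, reserve-only) pairs building a dict with a single two-pointer merge over the two sorted deduped lists that counts each adjacent reserve once, and replaces the post-hoc cap with min.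
import Mathlib
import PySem

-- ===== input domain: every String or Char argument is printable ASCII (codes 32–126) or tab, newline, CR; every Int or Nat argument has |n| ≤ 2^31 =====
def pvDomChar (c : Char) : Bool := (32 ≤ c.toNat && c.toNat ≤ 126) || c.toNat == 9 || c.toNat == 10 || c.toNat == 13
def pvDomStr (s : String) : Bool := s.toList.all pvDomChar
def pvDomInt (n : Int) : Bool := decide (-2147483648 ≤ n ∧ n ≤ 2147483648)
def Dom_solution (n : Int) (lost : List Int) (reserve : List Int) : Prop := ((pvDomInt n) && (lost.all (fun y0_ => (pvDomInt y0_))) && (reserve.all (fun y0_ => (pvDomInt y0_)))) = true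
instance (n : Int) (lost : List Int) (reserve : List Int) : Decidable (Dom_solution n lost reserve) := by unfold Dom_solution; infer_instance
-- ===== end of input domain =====

-- B replaces A's nested O(L*R) adjacency scan with a single two-pointer merge of the
-- two sorted deduped lists and caps the answer with min (objective: faster).

-- ===== PORT A =====
def solution (n : Int) (lost : List Int) (reserve : List Int) : Int :=
  let lost_without_rez :=
    PySem.List.sorted (PySem.Set.diff (PySem.Set.ofList lost) (PySem.Set.ofList reserve)) (fun x => x) false
  let reserve_without_loss :=
    PySem.List.sorted (PySem.Set.diff (PySem.Set.ofList reserve) (PySem.Set.ofList lost)) (fun x => x) false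
  let pairs : PySem.Dict Int Int :=
    lost_without_rez.foldl (fun d lost_stu =>
      reserve_without_loss.foldl (fun d reserve_stu =>
        if lost_stu - reserve_stu = -1 ∨ lost_stu - reserve_stu = 1 then
          d.insert reserve_stu lost_stu
        else d) d) PySem.Dict.empty
  let answer := n - (lost_without_rez.length : Int) + ((PySem.Set.ofList pairs.keys).length : Int)
  if answer > n then n else answer

-- ===== PORT B =====
-- the for-loop over res_only with the advancing index i of Source B: the while loop is the dropWhile
def altGo (ls rs : List Int) : Int :=
  match rs with
  | [] => 0
  | r :: rs' =>
    let ls' := ls.dropWhile (fun l => decide (l < r - 1))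
    (match ls'.head? with
     | some l => if l = r - 1 ∨ l = r + 1 then (1 : Int) else 0
     | none => 0) + altGo ls' rs'

def solution_alt (n : Int) (lost : List Int) (reserve : List Int) : Int :=
  let lost_only :=
    PySem.List.sorted (PySem.Set.diff (PySem.Set.ofList lost) (PySem.Set.ofList reserve)) (fun x => x) false
  let res_only :=
    PySem.List.sorted (PySem.Set.diff (PySem.Set.ofList reserve) (PySem.Set.ofList lost)) (fun x => x) false
  min n (n - (lost_only.length : Int) + altGo lost_only res_only)

-- ===== PRECONDITION & SPEC =====
def Spec_solution (n : Int) (lost : List Int) (reserve : List Int) (out : Int) : Prop := out = solution_alt n lost reserve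
instance (n : Int) (lost : List Int) (reserve : List Int) (out : Int) : Decidable (Spec_solution n lost reserve out) := by unfold Spec_solution; infer_instance

-- ===== CLAIM (what is proved, stated in full; the proofs are below) =====
def Claim_equal_solution : Prop := ∀ (n : Int) (lost : List Int) (reserve : List Int), Dom_solution n lost reserve → Spec_solution n lost reserve (solution n lost reserve)

-- ===== LEMMAS AND PROOFS =====

-- membership in the keys of A's inner fold
theorem keys_inner (rs : List Int) (l : Int) (d : PySem.Dict Int Int) (r' : Int) :
    r' ∈ (rs.foldl (fun d r => if l - r = -1 ∨ l - r = 1 then d.insert r l else d) d).keys ↔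
      (r' ∈ rs ∧ (l - r' = -1 ∨ l - r' = 1)) ∨ r' ∈ d.keys := by
  induction rs generalizing d with
  | nil => simp
  | cons r rs ih =>
    simp only [List.foldl_cons, ih]
    by_cases h : l - r = -1 ∨ l - r = 1
    · simp only [if_pos h, PySem.Dict.mem_keys_insert, List.mem_cons]
      constructor
      · rintro (⟨hm, hd⟩ | (rfl | hd))
        · exact Or.inl ⟨Or.inr hm, hd⟩
        · exact Or.inl ⟨Or.inl rfl, h⟩
        · exact Or.inr hd
      · rintro (⟨(rfl | hm), hd⟩ | hd)
        · exact Or.inr (Or.inl rfl)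
        · exact Or.inl ⟨hm, hd⟩
        · exact Or.inr (Or.inr hd)
    · simp only [if_neg h, List.mem_cons]
      constructor
      · rintro (⟨hm, hd⟩ | hd)
        · exact Or.inl ⟨Or.inr hm, hd⟩
        · exact Or.inr hd
      · rintro (⟨(rfl | hm), hd⟩ | hd)
        · exact absurd hd h
        · exact Or.inl ⟨hm, hd⟩
        · exact Or.inr hd

theorem nodup_keys_inner (rs : List Int) (l : Int) (d : PySem.Dict Int Int)
    (h : d.keys.Nodup) :
    (rs.foldl (fun d r => if l - r = -1 ∨ l - r = 1 then d.insert r l else d) d).keys.Nodup := by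
  induction rs generalizing d with
  | nil => exact h
  | cons r rs ih =>
    simp only [List.foldl_cons]
    by_cases hc : l - r = -1 ∨ l - r = 1
    · exact ih _ (by rw [if_pos hc]; exact PySem.Dict.nodup_keys_insert _ _ _ h)
    · exact ih _ (by rw [if_neg hc]; exact h)

theorem keys_outer (ls rs : List Int) (d : PySem.Dict Int Int) (r' : Int) :
    r' ∈ (ls.foldl (fun d l => rs.foldl (fun d r => if l - r = -1 ∨ l - r = 1 then d.insert r l else d) d) d).keys ↔
      (∃ l ∈ ls, r' ∈ rs ∧ (l - r' = -1 ∨ l - r' = 1)) ∨ r' ∈ d.keys := by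
  induction ls generalizing d with
  | nil => simp
  | cons l ls ih =>
    simp only [List.foldl_cons, ih, keys_inner, List.mem_cons]
    constructor
    · rintro (⟨x, hx, hm⟩ | (⟨hm, hd⟩ | hd))
      · exact Or.inl ⟨x, Or.inr hx, hm⟩
      · exact Or.inl ⟨l, Or.inl rfl, hm, hd⟩
      · exact Or.inr hd
    · rintro (⟨x, (rfl | hx), hm⟩ | hd)
      · exact Or.inr (Or.inl hm)
      · exact Or.inl ⟨x, hx, hm⟩
      · exact Or.inr (Or.inr hd)

theorem nodup_keys_outer (ls rs : List Int) (d : PySem.Dict Int Int) (h : d.keys.Nodup) :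
    (ls.foldl (fun d l => rs.foldl (fun d r => if l - r = -1 ∨ l - r = 1 then d.insert r l else d) d) d).keys.Nodup := by
  induction ls generalizing d with
  | nil => exact h
  | cons l ls ih => exact ih _ (nodup_keys_inner _ _ _ h)

-- an element failing the dropWhile predicate survives the dropWhile
theorem mem_dropWhile_of_not {α : Type} (p : α → Bool) (ls : List α) (x : α)
    (hm : x ∈ ls) (hp : p x = false) : x ∈ ls.dropWhile p := by
  induction ls with
  | nil => cases hm
  | cons a t ih =>
    by_cases ha : p a = true
    · rw [List.dropWhile_cons_of_pos ha]
      rcases List.mem_cons.mp hm with rfl | hm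
      · rw [ha] at hp; cases hp
      · exact ih hm
    · rw [List.dropWhile_cons_of_neg ha]
      exact hm

-- in a strictly sorted list, everything surviving dropWhile (· < c) is ≥ c
theorem dropWhile_ge (c : Int) (ls : List Int) (hs : ls.Pairwise (· < ·)) :
    ∀ l ∈ ls.dropWhile (fun l => decide (l < c)), c ≤ l := by
  induction ls with
  | nil => simp
  | cons a t ih =>
    by_cases ha : a < c
    · rw [List.dropWhile_cons_of_pos (by simpa using ha)]
      exact ih (List.Pairwise.of_cons hs)
    · rw [List.dropWhile_cons_of_neg (by simpa using ha)]
      intro l hl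
      rcases List.mem_cons.mp hl with rfl | hl
      · omega
      · have := (List.pairwise_cons.mp hs).1 l hl; omega

-- the two-pointer sweep counts exactly the reserves adjacent to some lost value
theorem altGo_spec (rs : List Int) : ∀ (ls : List Int), ls.Pairwise (· < ·) →
    rs.Pairwise (· < ·) → (∀ r ∈ rs, r ∉ ls) →
    altGo ls rs = ((rs.filter (fun r => decide (∃ l ∈ ls, l = r - 1 ∨ l = r + 1))).length : Int) := by
  induction rs with
  | nil => intro ls _ _ _; simp [altGo]
  | cons r rs' ih =>
    intro ls hls hrs hdisj
    have hsub : (ls.dropWhile (fun l => decide (l < r - 1))).Sublist ls := List.dropWhile_sublist _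
    set ls' := ls.dropWhile (fun l => decide (l < r - 1)) with hls'
    have hge : ∀ l ∈ ls', r - 1 ≤ l := dropWhile_ge (r - 1) ls hls
    have hls'p : ls'.Pairwise (· < ·) := hls.sublist hsub
    have hmem' : ∀ l, l ∈ ls → (¬ l < r - 1) → l ∈ ls' :=
      fun l hm hp => mem_dropWhile_of_not _ ls l hm (by simpa using hp)
    -- head check ↔ existential on ls (then on ls')
    have hex : (∃ l ∈ ls, l = r - 1 ∨ l = r + 1) ↔ (∃ l ∈ ls', l = r - 1 ∨ l = r + 1) := by
      constructor
      · rintro ⟨l, hm, hl⟩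
        exact ⟨l, hmem' l hm (by omega), hl⟩
      · rintro ⟨l, hm, hl⟩
        exact ⟨l, hsub.mem hm, hl⟩
    have hrnot : r ∉ ls' := fun h => hdisj r (List.mem_cons_self ..) (hsub.mem h)
    have hhead : (match ls'.head? with
        | some l => if l = r - 1 ∨ l = r + 1 then (1 : Int) else 0
        | none => 0) = if ∃ l ∈ ls', l = r - 1 ∨ l = r + 1 then (1 : Int) else 0 := by
      cases hL : ls' with
      | nil => simp
      | cons a t =>
        simp only [List.head?_cons]
        by_cases hA : a = r - 1 ∨ a = r + 1
        · rw [if_pos hA, if_pos ⟨a, by simp, hA⟩]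
        · rw [if_neg hA, if_neg ?_]
          rintro ⟨l, hm, hl⟩
          have ha1 : r - 1 ≤ a := hge a (by simp [hL])
          have ha2 : a ≠ r := fun h => hrnot (by simp [hL, h])
          have hp2 : (a :: t).Pairwise (· < ·) := by rw [← hL]; exact hls'p
          rcases List.mem_cons.mp hm with rfl | hm3
          · exact hA hl
          · have : a < l := (List.pairwise_cons.mp hp2).1 l hm3
            omega
    -- tail: dropping elements < r-1 cannot remove a neighbour of a later r' > r
    have hcong : rs'.filter (fun r'' => decide (∃ l ∈ ls, l = r'' - 1 ∨ l = r'' + 1)) =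
        rs'.filter (fun r'' => decide (∃ l ∈ ls', l = r'' - 1 ∨ l = r'' + 1)) := by
      apply List.filter_congr
      intro r'' hm
      have hrr : r < r'' := (List.pairwise_cons.mp hrs).1 r'' hm
      simp only [decide_eq_decide]
      constructor
      · rintro ⟨l, hlm, hl⟩
        exact ⟨l, hmem' l hlm (by omega), hl⟩
      · rintro ⟨l, hlm, hl⟩
        exact ⟨l, hsub.mem hlm, hl⟩
    have htl := ih ls' hls'p (List.Pairwise.of_cons hrs)
      (fun r'' h hm => hdisj r'' (List.mem_cons_of_mem _ h) (hsub.mem hm))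
    show (match ls'.head? with
        | some l => if l = r - 1 ∨ l = r + 1 then (1 : Int) else 0
        | none => 0) + altGo ls' rs' = _
    rw [hhead, htl, ← hcong, List.filter_cons]
    by_cases hx : ∃ l ∈ ls, l = r - 1 ∨ l = r + 1
    · rw [if_pos (hex.mp hx), if_pos (by simpa using hx)]
      push_cast [List.length_cons]; ring
    · rw [if_neg (fun h => hx (hex.mpr h)), if_neg (by simpa using hx)]
      ring

theorem pairwise_lt_of_le_nodup (l : List Int)
    (h1 : l.Pairwise (fun a b => a ≤ b)) (h2 : l.Nodup) : l.Pairwise (· < ·) :=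
  (h1.and h2).imp (fun h => lt_of_le_of_ne h.1 h.2)

-- the whole body, with the two sorted deduped lists generalized
theorem core (n : Int) (lostOnly resOnly : List Int)
    (hLlt : lostOnly.Pairwise (· < ·)) (hRlt : resOnly.Pairwise (· < ·))
    (hRnd : resOnly.Nodup)
    (hdisj : ∀ r ∈ resOnly, r ∉ lostOnly) :
    (if n - (lostOnly.length : Int) +
        ((PySem.Set.ofList (lostOnly.foldl (fun d lost_stu =>
            resOnly.foldl (fun d reserve_stu =>
              if lost_stu - reserve_stu = -1 ∨ lost_stu - reserve_stu = 1 then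
                d.insert reserve_stu lost_stu
              else d) d) (PySem.Dict.empty (κ := Int) (ν := Int))).keys).length : Int) > n
      then n
      else n - (lostOnly.length : Int) +
        ((PySem.Set.ofList (lostOnly.foldl (fun d lost_stu =>
            resOnly.foldl (fun d reserve_stu =>
              if lost_stu - reserve_stu = -1 ∨ lost_stu - reserve_stu = 1 then
                d.insert reserve_stu lost_stu
              else d) d) (PySem.Dict.empty (κ := Int) (ν := Int))).keys).length : Int)) =
    min n (n - (lostOnly.length : Int) + altGo lostOnly resOnly) := by
  set pairs := lostOnly.foldl (fun d lost_stu =>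
      resOnly.foldl (fun d reserve_stu =>
        if lost_stu - reserve_stu = -1 ∨ lost_stu - reserve_stu = 1 then
          d.insert reserve_stu lost_stu
        else d) d) (PySem.Dict.empty (κ := Int) (ν := Int)) with hpairs
  have hknd : pairs.keys.Nodup := nodup_keys_outer _ _ _ (by simp)
  have hset : PySem.Set.ofList pairs.keys = pairs.keys := PySem.Set.ofList_eq_self_of_nodup _ hknd
  have hperm : pairs.keys.Perm
      (resOnly.filter (fun r => decide (∃ l ∈ lostOnly, l = r - 1 ∨ l = r + 1))) := by
    rw [List.perm_ext_iff_of_nodup hknd (hRnd.filter _)]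
    intro r'
    rw [hpairs, keys_outer, List.mem_filter]
    simp only [PySem.Dict.keys_empty, List.mem_nil_iff, or_false, decide_eq_true_eq]
    constructor
    · rintro ⟨l, hlm, hrm, hd⟩
      exact ⟨hrm, l, hlm, by omega⟩
    · rintro ⟨hrm, l, hlm, hd⟩
      exact ⟨l, hlm, hrm, by omega⟩
  have hcount : ((PySem.Set.ofList pairs.keys).length : Int) = altGo lostOnly resOnly := by
    rw [hset, hperm.length_eq, altGo_spec resOnly lostOnly hLlt hRlt hdisj]
  rw [hcount]
  omega

-- ===== VERDICT (by name: the statement is the Claim_ definition above) =====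
theorem solution_spec : Claim_equal_solution := by
  intro n lost reserve _
  show solution n lost reserve = solution_alt n lost reserve
  have nd : ∀ (xs ys : List Int),
      (PySem.List.sorted (PySem.Set.diff (PySem.Set.ofList xs) (PySem.Set.ofList ys)) (fun x => x) false).Nodup :=
    fun xs ys => ((PySem.List.sorted_perm _ _ _).nodup_iff).mpr
      (PySem.Set.nodup_diff _ _ (PySem.Set.nodup_ofList _))
  have lt : ∀ (xs ys : List Int),
      (PySem.List.sorted (PySem.Set.diff (PySem.Set.ofList xs) (PySem.Set.ofList ys)) (fun x => x) false).Pairwise (· < ·) :=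
    fun xs ys => pairwise_lt_of_le_nodup _ (PySem.List.sorted_pairwise _ _) (nd xs ys)
  have hdisj : ∀ r ∈ PySem.List.sorted (PySem.Set.diff (PySem.Set.ofList reserve) (PySem.Set.ofList lost)) (fun x => x) false,
      r ∉ PySem.List.sorted (PySem.Set.diff (PySem.Set.ofList lost) (PySem.Set.ofList reserve)) (fun x => x) false := by
    intro r hr hl
    have h1 := (PySem.Set.mem_diff _ _ _).mp ((PySem.List.mem_sorted _ _ _ _).mp hr)
    have h2 := (PySem.Set.mem_diff _ _ _).mp ((PySem.List.mem_sorted _ _ _ _).mp hl)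
    exact h1.2 ((PySem.Set.mem_ofList _ _).mpr ((PySem.Set.mem_ofList _ _).mp h2.1))
  exact core n _ _ (lt lost reserve) (lt reserve lost) (nd reserve lost) hdisj
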